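-- pv_equiv track=rewrite | github.com/SuBoll/SZl-identifier | general_szl_identifier/generate_nonisomorphic_szl.py | _enumerate_multiplicities_rec
-- ===== SOURCE A (Python) =====
-- from typing import Dict, List, Tuple, Optional, TextIO
--
-- def _enumerate_multiplicities_rec(
--     pairs: List[Tuple[int, int]],
--     remaining: int,
--     max_per: int,
--     prefix: List[int],
-- ) -> List[Tuple[int, ...]]:
--     """Recursively enumerate all multiplicity tuples summing to remaining, each ≤ max_per."""
--     if len(pairs) == 0:
--         if remaining == 0:
--             return [tuple(prefix)]
--         return []
--     out: List[Tuple[int, ...]] = []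
--     hi = min(remaining, max_per)
--     for k in range(hi, -1, -1):
--         out.extend(
--             _enumerate_multiplicities_rec(pairs[1:], remaining - k, max_per, prefix + [k])
--         )
--     return out
-- ===== SOURCE B (Python) =====
-- def _enumerate_multiplicities_rec(pairs, remaining, max_per, prefix):
--     """Iterative breadth-first enumeration: keep a frontier of
--     (partial prefix, remaining) states, expand it once per pair, pruning
--     states whose remaining cannot be absorbed by the slots left, then keep
--     the states whose remaining is exactly 0."""
--     states = [(list(prefix), remaining)]
--     slots = len(pairs)
--     for _ in pairs:
--         slots -= 1
--         nxt = []
--         for pre, rem in states: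
--             for k in range(min(rem, max_per), -1, -1):
--                 r2 = rem - k
--                 if 0 <= r2 <= max_per * slots:
--                     nxt.append((pre + [k], r2))
--         states = nxt
--     return [tuple(pre) for pre, rem in states if rem == 0]
-- ===== Notes on version B (the rewrite author's own statement) =====
-- stated objective: alternative
-- what changed: B replaces A's depth-first recursion by an iterative breadth-first sweep: it maintains a frontier of (partial prefix, remaining) states, expands the whole frontier once per pair while pruning states whose remaining cannot be absorbed by the slots left (0 <= rem <= max_per*slots), and finally keeps the states whose remaining is exactly 0; frontier order coincides with A's DFS output order, and pruned states contribute no tuple, so the outputs are identical.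
import Mathlib
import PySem

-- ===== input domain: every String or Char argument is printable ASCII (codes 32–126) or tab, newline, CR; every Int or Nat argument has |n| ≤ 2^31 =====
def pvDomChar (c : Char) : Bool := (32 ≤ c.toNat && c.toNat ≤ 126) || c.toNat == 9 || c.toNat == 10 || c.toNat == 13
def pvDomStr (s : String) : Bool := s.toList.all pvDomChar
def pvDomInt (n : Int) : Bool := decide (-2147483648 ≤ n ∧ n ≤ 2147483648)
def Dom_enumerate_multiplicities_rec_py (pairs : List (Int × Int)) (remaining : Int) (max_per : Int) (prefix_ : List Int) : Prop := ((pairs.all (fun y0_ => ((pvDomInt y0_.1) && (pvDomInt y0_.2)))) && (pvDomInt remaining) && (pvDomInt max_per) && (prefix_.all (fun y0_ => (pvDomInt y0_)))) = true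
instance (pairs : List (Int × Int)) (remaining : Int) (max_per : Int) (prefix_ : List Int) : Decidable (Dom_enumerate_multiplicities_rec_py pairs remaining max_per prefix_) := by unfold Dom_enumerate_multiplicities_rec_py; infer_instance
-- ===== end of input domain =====

-- B replaces A's depth-first recursion by an iterative breadth-first sweep over a frontier of (prefix, remaining) states, pruning infeasible states (alternative decomposition, same output).

-- ===== PORT A =====
-- literal port: for k in range(hi, -1, -1): out.extend(rec(pairs[1:], remaining-k, max_per, prefix+[k]))
def enumerate_multiplicities_rec_py (pairs : List (Int × Int)) (remaining : Int) (max_per : Int) (prefix_ : List Int) : List (List Int) :=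
  match pairs with
  | [] => if remaining = 0 then [prefix_] else []
  | _ :: rest =>
    let hi : Int := min remaining max_per
    (PySem.List.pyRange hi (-1) (-1)).foldl
      (fun out k => out ++ enumerate_multiplicities_rec_py rest (remaining - k) max_per (prefix_ ++ [k])) []

-- ===== PORT B =====
-- literal port of Source B: states = [(prefix, remaining)]; one expansion pass per pair keeping only
-- feasible states (0 ≤ rem-k ≤ max_per*slots_left); finally filter rem == 0
def enumerate_multiplicities_rec_py_alt (pairs : List (Int × Int)) (remaining : Int) (max_per : Int) (prefix_ : List Int) : List (List Int) :=
  let res : List (List Int × Int) × Int :=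
    pairs.foldl
      (fun st _ =>
        let slots := st.2 - 1
        (st.1.foldl
          (fun nxt s =>
            (PySem.List.pyRange (min s.2 max_per) (-1) (-1)).foldl
              (fun nxt k =>
                if 0 ≤ s.2 - k ∧ s.2 - k ≤ max_per * slots then nxt ++ [(s.1 ++ [k], s.2 - k)]
                else nxt)
              nxt)
          [], slots))
      ([(prefix_, remaining)], (pairs.length : Int))
  (res.1.filter (fun s => s.2 == 0)).map (fun s => s.1)

-- ===== PRECONDITION & SPEC =====
def Spec_enumerate_multiplicities_rec_py (pairs : List (Int × Int)) (remaining : Int) (max_per : Int) (prefix_ : List Int) (out : List (List Int)) : Prop := out = enumerate_multiplicities_rec_py_alt pairs remaining max_per prefix_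
instance (pairs : List (Int × Int)) (remaining : Int) (max_per : Int) (prefix_ : List Int) (out : List (List Int)) : Decidable (Spec_enumerate_multiplicities_rec_py pairs remaining max_per prefix_ out) := by unfold Spec_enumerate_multiplicities_rec_py; infer_instance

-- ===== CLAIM (what is proved, stated in full; the proofs are below) =====
def Claim_equal_enumerate_multiplicities_rec_py : Prop := ∀ (pairs : List (Int × Int)) (remaining : Int) (max_per : Int) (prefix_ : List Int), Dom_enumerate_multiplicities_rec_py pairs remaining max_per prefix_ → Spec_enumerate_multiplicities_rec_py pairs remaining max_per prefix_ (enumerate_multiplicities_rec_py pairs remaining max_per prefix_)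

-- ===== LEMMAS AND PROOFS =====

-- pyRange with step -1 as a map over a Nat range
theorem pyRange_neg_rep (a b : Int) :
    PySem.List.pyRange a b (-1) = (List.range (a - b).toNat).map (fun (k : Nat) => a - (k : Int)) := by
  unfold PySem.List.pyRange
  simp only [show ¬((-1:Int) = 0) from by decide, if_false, show ¬((0:Int) < -1) from by decide]
  split_ifs with h
  · have hc : (a - b + -(-1) - 1) / -(-1) = a - b := by norm_num
    rw [hc]
    apply List.map_congr_left
    intro k _
    ring
  · have : (a - b).toNat = 0 := by omega
    simp [this]

theorem mem_pyRange_neg {x a b : Int} (h : x ∈ PySem.List.pyRange a b (-1)) : b < x ∧ x ≤ a := by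
  rw [pyRange_neg_rep] at h
  simp only [List.mem_map, List.mem_range] at h
  obtain ⟨k, hk, rfl⟩ := h
  constructor <;> omega

-- a fold that appends only empty lists keeps its accumulator
theorem foldl_app_nil {α : Type} (g : Int → List α) (l : List Int) (acc : List α)
    (h : ∀ k ∈ l, g k = []) : l.foldl (fun out k => out ++ g k) acc = acc := by
  induction l generalizing acc with
  | nil => rfl
  | cons x xs ih =>
    simp only [List.foldl_cons]
    rw [h x (by simp), List.append_nil]
    exact ih acc (fun k hk => h k (by simp [hk]))

-- A returns [] whenever remaining exceeds what the slots can absorb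
theorem a_empty (pairs : List (Int × Int)) (remaining max_per : Int) (prefix_ : List Int)
    (h : max_per * (pairs.length : Int) < remaining) :
    enumerate_multiplicities_rec_py pairs remaining max_per prefix_ = [] := by
  induction pairs generalizing remaining prefix_ with
  | nil =>
    simp only [List.length_nil, Int.natCast_zero, mul_zero] at h
    simp only [enumerate_multiplicities_rec_py]
    rw [if_neg (by omega)]
  | cons p rest ih =>
    rw [enumerate_multiplicities_rec_py]
    apply foldl_app_nil
    intro k hk
    obtain ⟨hk1, hk2⟩ := mem_pyRange_neg hk
    apply ih
    have hlen : ((p :: rest).length : Int) = (rest.length : Int) + 1 := by simp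
    have hk3 : k ≤ max_per := le_trans hk2 (min_le_right _ _)
    rw [hlen] at h
    have hsplit : max_per * ((rest.length : Int) + 1) = max_per * (rest.length : Int) + max_per := by ring
    omega

-- A returns [] whenever remaining is negative
theorem a_neg (pairs : List (Int × Int)) (remaining max_per : Int) (prefix_ : List Int)
    (h : remaining < 0) :
    enumerate_multiplicities_rec_py pairs remaining max_per prefix_ = [] := by
  cases pairs with
  | nil =>
    simp only [enumerate_multiplicities_rec_py]
    rw [if_neg (by omega)]
  | cons p rest =>
    rw [enumerate_multiplicities_rec_py]
    have hz : (min remaining max_per - (-1)).toNat = 0 := by omega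
    rw [pyRange_neg_rep, hz]
    simp

-- generic flatMap algebra used to reshape the frontier
theorem flatMap_flatMap' {α β γ : Type} (l : List α) (f : α → List β) (g : β → List γ) :
    (l.flatMap f).flatMap g = l.flatMap (fun x => (f x).flatMap g) := by
  induction l with
  | nil => rfl
  | cons x xs ih => simp [List.flatMap_cons, List.flatMap_append, ih]

theorem map_flatMap' {α β γ : Type} (l : List α) (g : α → β) (f : β → List γ) :
    (l.map g).flatMap f = l.flatMap (fun x => f (g x)) := by
  induction l with
  | nil => rfl
  | cons x xs ih => simp [List.flatMap_cons, ih]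

-- dropping elements whose image is [] does not change a flatMap
theorem flatMap_filter_of_nil {α β : Type} (p : α → Bool) (f : α → List β) (l : List α)
    (h : ∀ x ∈ l, p x = false → f x = []) : (l.filter p).flatMap f = l.flatMap f := by
  induction l with
  | nil => rfl
  | cons x xs ih =>
    have ih' := ih (fun y hy hp => h y (by simp [hy]) hp)
    cases hx : p x with
    | true => simp [hx, List.flatMap_cons, ih']
    | false => simp [hx, List.flatMap_cons, ih', h x (by simp) hx]

-- one expansion pass of B equals a flatMap of the kept (feasible) children over the frontier
theorem expand_eq (max_per slots : Int) (S : List (List Int × Int)) (acc : List (List Int × Int)) :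
    S.foldl
      (fun nxt s =>
        (PySem.List.pyRange (min s.2 max_per) (-1) (-1)).foldl
          (fun nxt k =>
            if 0 ≤ s.2 - k ∧ s.2 - k ≤ max_per * slots then nxt ++ [(s.1 ++ [k], s.2 - k)]
            else nxt)
          nxt)
      acc
    = acc ++ S.flatMap (fun s =>
        ((PySem.List.pyRange (min s.2 max_per) (-1) (-1)).filter
            (fun k => decide (0 ≤ s.2 - k ∧ s.2 - k ≤ max_per * slots))).map
          (fun k => (s.1 ++ [k], s.2 - k))) := by
  induction S generalizing acc with
  | nil => simp
  | cons s rest ih =>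
    simp only [List.foldl_cons, List.flatMap_cons]
    rw [PySem.List.foldl_append_ite, ih, List.append_assoc]

-- the final pass of B over a frontier equals the filtered projection
theorem filter_map_eq (S : List (List Int × Int)) :
    (S.filter (fun s => s.2 == 0)).map (fun s => s.1)
    = S.flatMap (fun s => if s.2 = 0 then [s.1] else []) := by
  induction S with
  | nil => rfl
  | cons s rest ih =>
    by_cases h : s.2 = 0 <;> simp [List.flatMap_cons, h, ih]

-- A's recursive step as a flatMap over the descending range
theorem a_cons (p : Int × Int) (rest : List (Int × Int)) (remaining max_per : Int) (prefix_ : List Int) :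
    enumerate_multiplicities_rec_py (p :: rest) remaining max_per prefix_
    = (PySem.List.pyRange (min remaining max_per) (-1) (-1)).flatMap
        (fun k => enumerate_multiplicities_rec_py rest (remaining - k) max_per (prefix_ ++ [k])) := by
  rw [enumerate_multiplicities_rec_py]
  rw [PySem.List.foldl_append_eq_flatMap]
  simp

-- the staged BFS over any frontier computes the concatenation of A's results on its states
theorem bfs_stage (max_per : Int) (pairs : List (Int × Int)) (S : List (List Int × Int)) (c : Int)
    (hc : c = (pairs.length : Int)) :
    (((pairs.foldl
        (fun st _ =>
          let slots := st.2 - 1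
          (st.1.foldl
            (fun nxt s =>
              (PySem.List.pyRange (min s.2 max_per) (-1) (-1)).foldl
                (fun nxt k =>
                  if 0 ≤ s.2 - k ∧ s.2 - k ≤ max_per * slots then nxt ++ [(s.1 ++ [k], s.2 - k)]
                  else nxt)
                nxt)
            [], slots))
        (S, c)).1).filter (fun s => s.2 == 0)).map (fun s => s.1)
    = S.flatMap (fun s => enumerate_multiplicities_rec_py pairs s.2 max_per s.1) := by
  induction pairs generalizing S c with
  | nil =>
    simp only [List.foldl_nil]
    rw [filter_map_eq]
    apply List.flatMap_congr
    intro s _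
    simp [enumerate_multiplicities_rec_py]
  | cons p rest ih =>
    simp only [List.foldl_cons]
    rw [expand_eq, List.nil_append]
    have hc' : c - 1 = (rest.length : Int) := by simp at hc; omega
    rw [ih _ _ hc', flatMap_flatMap']
    apply List.flatMap_congr
    intro s _
    rw [map_flatMap']
    rw [flatMap_filter_of_nil]
    · rw [a_cons]
    · intro k hk hp
      simp only [decide_eq_false_iff_not, not_and, not_le] at hp
      rw [hc'] at hp
      by_cases h0 : 0 ≤ s.2 - k
      · exact a_empty _ _ _ _ (hp h0)
      · exact a_neg _ _ _ _ (by omega)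

-- ===== VERDICT (by name: the statement is the Claim_ definition above) =====
theorem enumerate_multiplicities_rec_py_spec : Claim_equal_enumerate_multiplicities_rec_py := by
  intro pairs remaining max_per prefix_ _
  show enumerate_multiplicities_rec_py pairs remaining max_per prefix_ = _
  rw [enumerate_multiplicities_rec_py_alt]
  rw [bfs_stage max_per pairs [(prefix_, remaining)] (pairs.length : Int) rfl]
  simp
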